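-- pv_equiv track=rewrite | github.com/rinward23/AstroEngine | astroengine/chinese/sexagenary.py | sexagenary_index
-- ===== SOURCE A (Python) =====
-- from typing import Final
--
-- SEXAGENARY_CYCLE_LENGTH: Final[int] = 60
--
-- def sexagenary_index(stem_index: int, branch_index: int) -> int:
--     """Return the 0-59 index for the provided stem/branch combination."""
--
--     target_stem = stem_index % 10
--     target_branch = branch_index % 12
--     for idx in range(SEXAGENARY_CYCLE_LENGTH):
--         if idx % 10 == target_stem and idx % 12 == target_branch:
--             return idx
--     msg = f"Invalid stem/branch pairing: stem={stem_index}, branch={branch_index}"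
--     raise ValueError(msg)
-- ===== SOURCE B (Python) =====
-- def sexagenary_index(stem_index: int, branch_index: int) -> int:
--     """Return the 0-59 index for the provided stem/branch combination."""
--     a = stem_index % 10
--     b = branch_index % 12
--     if (a - b) % 2 != 0:
--         msg = f"Invalid stem/branch pairing: stem={stem_index}, branch={branch_index}"
--         raise ValueError(msg)
--     return (a + 10 * (((a - b) // 2) % 6)) % 60
-- ===== Notes on version B (the rewrite author's own statement) =====
-- stated objective: simpler
-- what changed: Replaces the 60-iteration linear search with a closed-form CRT formula: a parity check for existence and direct modular arithmetic for the index.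
import Mathlib
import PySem

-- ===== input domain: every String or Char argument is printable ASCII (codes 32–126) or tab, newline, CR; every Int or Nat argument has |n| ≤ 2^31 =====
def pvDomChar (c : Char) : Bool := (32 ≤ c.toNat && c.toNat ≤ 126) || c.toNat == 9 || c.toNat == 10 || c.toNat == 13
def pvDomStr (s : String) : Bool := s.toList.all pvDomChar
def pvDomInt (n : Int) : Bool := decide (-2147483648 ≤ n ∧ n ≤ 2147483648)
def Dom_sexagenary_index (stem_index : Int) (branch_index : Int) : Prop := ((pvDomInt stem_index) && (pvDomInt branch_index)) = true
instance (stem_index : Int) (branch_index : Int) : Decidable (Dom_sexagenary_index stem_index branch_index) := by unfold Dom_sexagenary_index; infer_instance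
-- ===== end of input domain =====

-- B replaces A's 60-iteration search with a closed-form CRT formula (objective: simpler).

-- ===== PORT A =====
-- Loop 'for idx in range(60): if idx % 10 == target_stem and idx % 12 == target_branch: return idx'
-- ported as the first element of the range satisfying the test; the 'raise ValueError' fall-through
-- (no matching idx) is excluded by Pre_; the port returns 0 there.
def sexagenary_index (stem_index : Int) (branch_index : Int) : Int :=
  let target_stem := PySem.Int.mod stem_index 10
  let target_branch := PySem.Int.mod branch_index 12
  match (PySem.List.pyRange 0 60 1).find?
      (fun idx => PySem.Int.mod idx 10 == target_stem && PySem.Int.mod idx 12 == target_branch) with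
  | some idx => idx
  | none => 0

-- ===== PORT B =====
-- The 'raise ValueError' branch (odd parity) is excluded by Pre_; the port returns 0 there.
def sexagenary_index_alt (stem_index : Int) (branch_index : Int) : Int :=
  let a := PySem.Int.mod stem_index 10
  let b := PySem.Int.mod branch_index 12
  if PySem.Int.mod (a - b) 2 ≠ 0 then 0
  else PySem.Int.mod (a + 10 * (PySem.Int.mod (PySem.Int.floordiv (a - b) 2) 6)) 60

-- ===== PRECONDITION & SPEC =====
-- Pre_ excludes exactly the inputs where A (and B) raise ValueError: stem/branch residues of unequal parity.
def Pre_sexagenary_index (stem_index : Int) (branch_index : Int) : Prop :=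
  PySem.Int.mod (PySem.Int.mod stem_index 10 - PySem.Int.mod branch_index 12) 2 = 0
instance (stem_index : Int) (branch_index : Int) : Decidable (Pre_sexagenary_index stem_index branch_index) := by unfold Pre_sexagenary_index; infer_instance
def pvWitness_sexagenary_index : Int × Int := (3, 5)
def Spec_sexagenary_index (stem_index : Int) (branch_index : Int) (out : Int) : Prop := out = sexagenary_index_alt stem_index branch_index
instance (stem_index : Int) (branch_index : Int) (out : Int) : Decidable (Spec_sexagenary_index stem_index branch_index out) := by unfold Spec_sexagenary_index; infer_instance

-- ===== CLAIM (what is proved, stated in full; the proofs are below) =====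
def Claim_equal_sexagenary_index : Prop := ∀ (stem_index : Int) (branch_index : Int), Dom_sexagenary_index stem_index branch_index → Pre_sexagenary_index stem_index branch_index → Spec_sexagenary_index stem_index branch_index (sexagenary_index stem_index branch_index)

-- ===== LEMMAS AND PROOFS =====

-- Both programs depend only on the residues stem % 10 and branch % 12.
lemma sexagenary_index_red (s b : Int) :
    sexagenary_index s b = sexagenary_index (Int.fmod s 10) (Int.fmod b 12) := by
  simp [sexagenary_index, PySem.Int.mod]

lemma sexagenary_index_alt_red (s b : Int) :
    sexagenary_index_alt s b = sexagenary_index_alt (Int.fmod s 10) (Int.fmod b 12) := by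
  simp [sexagenary_index_alt, PySem.Int.mod]

-- The core equality on residues, checked exhaustively over the 120 residue pairs.
lemma core_dec : ∀ (a : Fin 10) (b : Fin 12),
    sexagenary_index (a.val : Int) (b.val : Int) = sexagenary_index_alt (a.val : Int) (b.val : Int)
    ∨ PySem.Int.mod ((a.val : Int) - (b.val : Int)) 2 ≠ 0 := by decide

-- ===== VERDICT (by name: the statement is the Claim_ definition above) =====
theorem sexagenary_index_spec : Claim_equal_sexagenary_index := by
  intro s b _ hpre
  unfold Spec_sexagenary_index
  rw [sexagenary_index_red, sexagenary_index_alt_red]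
  have ha0 : 0 ≤ Int.fmod s 10 := Int.fmod_nonneg_of_pos _ (by norm_num)
  have ha : Int.fmod s 10 < 10 := Int.fmod_lt_of_pos _ (by norm_num)
  have hb0 : 0 ≤ Int.fmod b 12 := Int.fmod_nonneg_of_pos _ (by norm_num)
  have hb : Int.fmod b 12 < 12 := Int.fmod_lt_of_pos _ (by norm_num)
  have hp : PySem.Int.mod (Int.fmod s 10 - Int.fmod b 12) 2 = 0 := hpre
  have h := core_dec ⟨(Int.fmod s 10).toNat, by omega⟩ ⟨(Int.fmod b 12).toNat, by omega⟩
  simp only [Int.toNat_of_nonneg ha0, Int.toNat_of_nonneg hb0] at h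
  rcases h with h | h
  · exact h
  · exact absurd hp h
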